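-- pv_equiv track=rewrite | github.com/MastewalB/a2sv-competitive-programming | Contest/contest/G3 #15 (Div. 3)/D.py | max_inversions
-- ===== SOURCE A (Python) =====
-- def max_inversions(A):
--     N = len(A)
--     O = [0] * N
--     Z = [0] * N
--     ans, f_z, l_o = 0, None, None
--     for i in range(N - 1, -1, -1):
--         if i < N - 1:
--             Z[i] += Z[i + 1]
--         if A[i] == 0:
--             Z[i] += 1
--         else:
--             if l_o == None:
--                 l_o = i
--     for i in range(N):
--         if i > 0:
--             O[i] += O[i - 1]
--
--         if A[i] == 1:
--             O[i] += 1
--         else: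
--             if f_z == None:
--                 f_z = i
--             ans += O[i]
--
--     a = b = 0
--     if f_z != None:
--         a = ans - O[f_z] + Z[f_z] - 1
--     if l_o != None:
--         b = ans - Z[l_o] + O[l_o] - 1
--     return max(ans, a, b)
-- ===== SOURCE B (Python) =====
-- def max_inversions(A):
--     # One forward pass with scalar counters; no prefix/suffix arrays, no reverse loop.
--     n = len(A)
--     ones = zeros = ans = ones_at_fnz = 0
--     f_nz = l_nz = None   # first index with x != 1, last index with x != 0
--     for i, x in enumerate(A):
--         if x == 1:
--             ones += 1
--         else:
--             ans += ones
--             if f_nz is None: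
--                 f_nz = i
--                 ones_at_fnz = ones
--         if x == 0:
--             zeros += 1
--         else:
--             l_nz = i
--     best = ans
--     if f_nz is not None:
--         best = max(best, ans - ones_at_fnz + zeros - 1)
--     if l_nz is not None:
--         best = max(best, ans - (n - 1 - l_nz) + ones - 1)
--     return best
-- ===== Notes on version B (the rewrite author's own statement) =====
-- stated objective: simpler
-- what changed: Replaced A's two index-loops building prefix-ones and suffix-zeros arrays (plus a backward scan) by a single forward pass over the list keeping scalar counters (ones, zeros, ans, first non-1 index with its ones-count, last non-0 index) and closed-form expressions for the two boundary candidates.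
import Mathlib
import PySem

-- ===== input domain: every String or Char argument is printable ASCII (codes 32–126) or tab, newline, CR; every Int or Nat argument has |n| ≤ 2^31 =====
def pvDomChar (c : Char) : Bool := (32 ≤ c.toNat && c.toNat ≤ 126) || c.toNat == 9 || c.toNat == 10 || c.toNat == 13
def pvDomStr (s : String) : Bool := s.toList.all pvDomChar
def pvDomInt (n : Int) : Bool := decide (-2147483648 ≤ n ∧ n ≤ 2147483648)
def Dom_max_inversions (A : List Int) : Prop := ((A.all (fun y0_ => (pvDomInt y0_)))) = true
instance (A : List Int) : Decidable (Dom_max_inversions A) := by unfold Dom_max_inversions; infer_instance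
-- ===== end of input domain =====

-- B replaces A's two index-loops over prefix/suffix count arrays by one forward pass
-- keeping scalar counters and closed forms for the two boundary candidates (objective: simpler).


-- ===== PORT A =====
-- one step of A's backward loop (state: Z array, l_o); loop indices are always in range,
-- so A[i] / Z[i] are ported with getD (exact: no index error can occur)
def zStep (A : List Int) (N : Int) (s : List Int × Option Int) (i : Int) : List Int × Option Int :=
  let Z := s.1
  let lo := s.2
  let Z := if i < N - 1 then Z.set i.toNat (Z.getD i.toNat 0 + Z.getD (i.toNat + 1) 0) else Z
  if A.getD i.toNat 0 = 0 then
    (Z.set i.toNat (Z.getD i.toNat 0 + 1), lo)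
  else
    (Z, if lo = none then some i else lo)

-- one step of A's forward loop (state: O array, f_z, ans)
def oStep (A : List Int) (s : List Int × Option Int × Int) (i : Int) : List Int × Option Int × Int :=
  let O := s.1
  let fz := s.2.1
  let ans := s.2.2
  let O := if 0 < i then O.set i.toNat (O.getD i.toNat 0 + O.getD (i.toNat - 1) 0) else O
  if A.getD i.toNat 0 = 1 then
    (O.set i.toNat (O.getD i.toNat 0 + 1), fz, ans)
  else
    (O, (if fz = none then some i else fz), ans + O.getD i.toNat 0)

def max_inversions (A : List Int) : Int :=
  let N : Int := A.length
  let s1 := (PySem.List.pyRange (N - 1) (-1) (-1)).foldl (zStep A N) (List.replicate A.length 0, none)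
  let Z := s1.1
  let l_o := s1.2
  let s2 := (PySem.List.pyRange 0 N 1).foldl (oStep A) (List.replicate A.length 0, none, 0)
  let O := s2.1
  let f_z := s2.2.1
  let ans := s2.2.2
  let a := match f_z with
    | some f => ans - O.getD f.toNat 0 + Z.getD f.toNat 0 - 1
    | none => 0
  let b := match l_o with
    | some l => ans - Z.getD l.toNat 0 + O.getD l.toNat 0 - 1
    | none => 0
  max ans (max a b)

-- ===== PORT B =====
-- B's single forward loop; Python's `for i, x in enumerate(A)` becomes structural recursion
-- on the list carrying the index i
def bLoop (i ones zeros ans : Int) (fnz : Option Int) (oafz : Int) (lnz : Option Int) :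
    List Int → Int × Int × Int × Option Int × Int × Option Int
  | [] => (ones, zeros, ans, fnz, oafz, lnz)
  | x :: xs =>
    let (ones', ans', fnz', oafz') :=
      if x = 1 then (ones + 1, ans, fnz, oafz)
      else (ones, ans + ones, (if fnz = none then some i else fnz), (if fnz = none then ones else oafz))
    let (zeros', lnz') := if x = 0 then (zeros + 1, lnz) else (zeros, some i)
    bLoop (i + 1) ones' zeros' ans' fnz' oafz' lnz' xs

def max_inversions_alt (A : List Int) : Int :=
  let n : Int := A.length
  let r := bLoop 0 0 0 0 none 0 none A
  let ones := r.1
  let zeros := r.2.1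
  let ans := r.2.2.1
  let f_nz := r.2.2.2.1
  let ones_at_fnz := r.2.2.2.2.1
  let l_nz := r.2.2.2.2.2
  let best := ans
  let best := match f_nz with
    | some _ => max best (ans - ones_at_fnz + zeros - 1)
    | none => best
  let best := match l_nz with
    | some l => max best (ans - (n - 1 - l) + ones - 1)
    | none => best
  best

-- ===== PRECONDITION & SPEC =====
def Spec_max_inversions (A : List Int) (out : Int) : Prop := out = max_inversions_alt A
instance (A : List Int) (out : Int) : Decidable (Spec_max_inversions A out) := by unfold Spec_max_inversions; infer_instance

-- ===== CLAIM (what is proved, stated in full; the proofs are below) =====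
def Claim_equal_max_inversions : Prop := ∀ (A : List Int), Dom_max_inversions A → Spec_max_inversions A (max_inversions A)

-- ===== LEMMAS AND PROOFS =====

-- spec-level quantities
def ocnt (l : List Int) : Int := (l.count 1 : Int)
def zcnt (l : List Int) : Int := (l.count 0 : Int)

-- running sum: at each non-1 element add the number of 1s seen so far
def ansS (c : Int) : List Int → Int
  | [] => 0
  | x :: xs => if x = 1 then ansS (c + 1) xs else c + ansS c xs

-- first index holding a non-1 element
def fnzI : List Int → Option Nat := List.findIdx? (fun x => !(x == 1))

-- last index holding a non-0 element
def lnzI : List Int → Option Nat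
  | [] => none
  | x :: xs =>
    match lnzI xs with
    | some j => some (j + 1)
    | none => if x ≠ 0 then some 0 else none

theorem ocnt_append (l m : List Int) : ocnt (l ++ m) = ocnt l + ocnt m := by
  simp [ocnt, List.count_append]

theorem zcnt_append (l m : List Int) : zcnt (l ++ m) = zcnt l + zcnt m := by
  simp [zcnt, List.count_append]

theorem ansS_append (l m : List Int) (c : Int) :
    ansS c (l ++ m) = ansS c l + ansS (c + ocnt l) m := by
  induction l generalizing c with
  | nil => simp [ansS, ocnt]
  | cons x xs ih =>
    by_cases hx : x = 1
    · simp only [List.cons_append, ansS, if_pos hx]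
      rw [ih]
      congr 2
      simp [ocnt, List.count_cons, hx]
      ring
    · simp only [List.cons_append, ansS, if_neg hx]
      rw [ih]
      have h1 : ocnt (x :: xs) = ocnt xs := by simp [ocnt, List.count_cons, hx]
      rw [h1]
      ring

theorem ansS_nonneg (l : List Int) (c : Int) (hc : 0 ≤ c) : 0 ≤ ansS c l := by
  induction l generalizing c with
  | nil => simp [ansS]
  | cons x xs ih =>
    by_cases hx : x = 1 <;> simp [ansS, hx]
    · exact ih (c + 1) (by omega)
    · have := ih c hc; omega

theorem fnzI_nil : fnzI [] = none := rfl

theorem fnzI_cons (x : Int) (xs : List Int) :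
    fnzI (x :: xs) = if x = 1 then (fnzI xs).map (· + 1) else some 0 := by
  by_cases hx : x = 1 <;> simp [fnzI, List.findIdx?_cons, hx]

theorem lnzI_none_spec (l : List Int) (h : lnzI l = none) :
    ∀ k, k < l.length → l.getD k 0 = 0 := by
  induction l with
  | nil => simp
  | cons x xs ih =>
    simp only [lnzI] at h
    cases hx : lnzI xs with
    | some j => rw [hx] at h; simp at h
    | none =>
      rw [hx] at h
      by_cases hx0 : x ≠ 0
      · rw [if_pos hx0] at h; simp at h
      · intro k hk
        cases k with
        | zero => simpa using (by omega : x = 0)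
        | succ k' => simpa using ih hx k' (by simpa using hk)

theorem lnzI_some_spec (l : List Int) (j : Nat) (h : lnzI l = some j) :
    j < l.length ∧ l.getD j 0 ≠ 0 ∧ ∀ k, j < k → k < l.length → l.getD k 0 = 0 := by
  induction l generalizing j with
  | nil => simp [lnzI] at h
  | cons x xs ih =>
    simp only [lnzI] at h
    cases hx : lnzI xs with
    | some j' =>
      rw [hx] at h
      simp at h
      obtain ⟨h1, h2, h3⟩ := ih j' hx
      subst h
      refine ⟨by simpa using h1, by simpa using h2, ?_⟩
      intro k hk1 hk2
      cases k with
      | zero => omega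
      | succ k' => simpa using h3 k' (by omega) (by simpa using hk2)
    | none =>
      rw [hx] at h
      by_cases hx0 : x ≠ 0
      · rw [if_pos hx0] at h
        simp at h
        subst h
        refine ⟨by simp, by simpa using hx0, ?_⟩
        intro k hk1 hk2
        cases k with
        | zero => omega
        | succ k' => simpa using lnzI_none_spec xs hx k' (by simpa using hk2)
      · rw [if_neg hx0] at h; simp at h

theorem fnzI_some_spec (l : List Int) (j : Nat) (h : fnzI l = some j) :
    j < l.length ∧ l.getD j 0 ≠ 1 ∧ ∀ k, k < j → l.getD k 0 = 1 := by
  induction l generalizing j with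
  | nil => simp [fnzI] at h
  | cons x xs ih =>
    rw [fnzI_cons] at h
    by_cases hx : x = 1
    · rw [if_pos hx] at h
      cases hj : fnzI xs with
      | none => rw [hj] at h; simp at h
      | some j' =>
        rw [hj] at h; simp at h
        obtain ⟨h1, h2, h3⟩ := ih j' hj
        subst h
        refine ⟨by simpa using h1, by simpa using h2, ?_⟩
        intro k hk
        cases k with
        | zero => simpa using hx
        | succ k' => simpa using h3 k' (by omega)
    · rw [if_neg hx] at h
      simp at h
      subst h
      exact ⟨by simp, by simpa using hx, by intro k hk; omega⟩

theorem fnzI_concat (l : List Int) (x : Int) :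
    fnzI (l ++ [x]) = match fnzI l with
      | some j => some j
      | none => if x = 1 then none else some l.length := by
  induction l with
  | nil => by_cases hx : x = 1 <;> simp [fnzI_cons, fnzI_nil, hx]
  | cons y ys ih =>
    by_cases hy : y = 1
    · rw [List.cons_append, fnzI_cons, if_pos hy, ih, fnzI_cons, if_pos hy]
      cases fnzI ys <;> by_cases hx : x = 1 <;> simp [hx]
    · rw [List.cons_append, fnzI_cons, if_neg hy, fnzI_cons, if_neg hy]

-- characterization of B's loop
theorem bLoop_spec (l : List Int) (i ones zeros ans oafz : Int) (fnz lnz : Option Int) :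
    bLoop i ones zeros ans fnz oafz lnz l =
      (ones + ocnt l,
       zeros + zcnt l,
       ans + ansS ones l,
       (match fnz with
        | some f => some f
        | none => (fnzI l).map (fun j => i + (j : Int))),
       (match fnz with
        | some _ => oafz
        | none => match fnzI l with
          | some j => ones + ocnt (l.take j)
          | none => oafz),
       (match lnzI l with
        | some j => some (i + (j : Int))
        | none => lnz)) := by
  induction l generalizing i ones zeros ans oafz fnz lnz with
  | nil => cases fnz <;> simp [bLoop, ocnt, zcnt, ansS, fnzI_nil, lnzI]
  | cons x xs ih =>
    by_cases hx1 : x = 1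
    · -- x = 1 (hence x ≠ 0)
      have hx0 : ¬ (x = 0) := by omega
      rw [show bLoop i ones zeros ans fnz oafz lnz (x :: xs) =
            bLoop (i + 1) (ones + 1) zeros ans fnz oafz (some i) xs by
          simp [bLoop, hx1, hx0]]
      rw [ih]
      rw [fnzI_cons, if_pos hx1]
      simp only [lnzI, Prod.mk.injEq]
      refine ⟨by simp [ocnt, List.count_cons, hx1]; ring, by simp [zcnt, List.count_cons, hx0],
        by simp [ansS, hx1], ?_, ?_, ?_⟩
      · cases fnz <;> cases hfx : fnzI xs <;> simp [hfx] <;> push_cast <;> ring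
      · cases fnz with
        | some f => simp
        | none =>
          cases hfx : fnzI xs <;> simp [hfx, ocnt, List.count_cons, hx1] <;> push_cast <;> ring
      · cases hlx : lnzI xs <;> simp [hlx, hx0] <;> push_cast <;> ring
    · -- x ≠ 1
      by_cases hx0 : x = 0
      · rw [show bLoop i ones zeros ans fnz oafz lnz (x :: xs) =
              bLoop (i + 1) ones (zeros + 1) (ans + ones)
                (if fnz = none then some i else fnz) (if fnz = none then ones else oafz) lnz xs by
            simp [bLoop, hx1, hx0]]
        rw [ih]
        rw [fnzI_cons, if_neg hx1]
        simp only [lnzI, Prod.mk.injEq]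
        refine ⟨by simp [ocnt, List.count_cons, hx1], by simp [zcnt, List.count_cons, hx0]; ring,
          by simp [ansS, hx1]; ring, ?_, ?_, ?_⟩
        · cases fnz <;> simp
        · cases fnz <;> simp [ocnt]
        · cases hlx : lnzI xs <;> simp [hlx, hx0] <;> push_cast <;> ring
      · rw [show bLoop i ones zeros ans fnz oafz lnz (x :: xs) =
              bLoop (i + 1) ones zeros (ans + ones)
                (if fnz = none then some i else fnz) (if fnz = none then ones else oafz) (some i) xs by
            simp [bLoop, hx1, hx0]]
        rw [ih]
        rw [fnzI_cons, if_neg hx1]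
        simp only [lnzI, Prod.mk.injEq]
        refine ⟨by simp [ocnt, List.count_cons, hx1], by simp [zcnt, List.count_cons, hx0],
          by simp [ansS, hx1]; ring, ?_, ?_, ?_⟩
        · cases fnz <;> simp
        · cases fnz <;> simp [ocnt]
        · cases hlx : lnzI xs <;> simp [hlx, hx0] <;> push_cast <;> ring

-- A-side invariants
def InvZ (A : List Int) (k : Nat) (s : List Int × Option Int) : Prop :=
  s.1.length = A.length ∧
  (∀ j, k ≤ j → j < A.length → s.1.getD j 0 = zcnt (A.drop j)) ∧
  (∀ j, j < k → s.1.getD j 0 = 0) ∧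
  s.2 = (lnzI (A.drop k)).map (fun j => ((k + j : Nat) : Int))

def InvO (A : List Int) (k : Nat) (s : List Int × Option Int × Int) : Prop :=
  s.1.length = A.length ∧
  (∀ j, j < k → s.1.getD j 0 = ocnt (A.take (j + 1))) ∧
  (∀ j, k ≤ j → s.1.getD j 0 = 0) ∧
  s.2.1 = (fnzI (A.take k)).map (fun j => ((j : Nat) : Int)) ∧
  s.2.2 = ansS 0 (A.take k)

theorem getD_set_self (l : List Int) (i : Nat) (a : Int) (h : i < l.length) :
    (l.set i a).getD i 0 = a := by
  simp [List.getD_eq_getElem?_getD, List.getElem?_set, h]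

theorem getD_set_ne (l : List Int) (i j : Nat) (a : Int) (h : i ≠ j) :
    (l.set i a).getD j 0 = l.getD j 0 := by
  simp [List.getD_eq_getElem?_getD, List.getElem?_set, h]

theorem getD_replicate (n j : Nat) : (List.replicate n (0 : Int)).getD j 0 = 0 := by
  by_cases h : j < n <;> simp [List.getD_eq_getElem?_getD, List.getElem?_replicate, h]

theorem drop_eq_getD_cons (A : List Int) (k : Nat) (h : k < A.length) :
    A.drop k = A.getD k 0 :: A.drop (k + 1) := by
  rw [List.getD_eq_getElem A 0 h]
  exact List.drop_eq_getElem_cons h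

theorem take_succ_getD (A : List Int) (k : Nat) (h : k < A.length) :
    A.take (k + 1) = A.take k ++ [A.getD k 0] := by
  rw [List.take_succ, List.getElem?_eq_getElem h]
  simp [List.getD_eq_getElem?_getD, List.getElem?_eq_getElem h]

theorem getD_drop_add (A : List Int) (n m : Nat) : (A.drop n).getD m 0 = A.getD (n + m) 0 := by
  simp [List.getD_eq_getElem?_getD, List.getElem?_drop]

theorem count_of_all_zero (l : List Int) (h : ∀ m, m < l.length → l.getD m 0 = 0) :
    l.count 0 = l.length ∧ l.count 1 = 0 := by
  induction l with
  | nil => simp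
  | cons x xs ih =>
    have hx : x = 0 := by simpa using h 0 (by simp)
    have hr := ih (fun m hm => by simpa using h (m + 1) (by simpa using hm))
    refine ⟨?_, ?_⟩ <;> simp [List.count_cons, hx, hr.1, hr.2]

theorem zcnt_cons (x : Int) (xs : List Int) :
    zcnt (x :: xs) = zcnt xs + (if x = 0 then 1 else 0) := by
  by_cases hx : x = 0 <;> simp [zcnt, List.count_cons, hx]

theorem zStep_inv (A : List Int) (k : Nat) (hk : k < A.length) (s : List Int × Option Int)
    (h : InvZ A (k + 1) s) : InvZ A k (zStep A A.length s (k : Int)) := by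
  obtain ⟨hlen, hup, hlow, hlo⟩ := h
  have hZk : s.1.getD k 0 = 0 := hlow k (by omega)
  -- the Z array after the `if i < N - 1` update
  have hZ1 : ∃ Z1 : List Int,
      (if (k : Int) < (A.length : Int) - 1 then
        s.1.set (Int.toNat (k : Int)) (s.1.getD (Int.toNat (k : Int)) 0 + s.1.getD (Int.toNat (k : Int) + 1) 0)
       else s.1) = Z1 ∧
      Z1.length = A.length ∧ Z1.getD k 0 = zcnt (A.drop (k + 1)) ∧
      (∀ j, j ≠ k → Z1.getD j 0 = s.1.getD j 0) := by
    by_cases hklt : (k : Int) < (A.length : Int) - 1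
    · refine ⟨_, by rw [if_pos hklt], ?_, ?_, ?_⟩
      · simp [hlen]
      · rw [Int.toNat_natCast]
        rw [getD_set_self _ _ _ (by omega)]
        rw [hZk, hup (k + 1) (by omega) (by omega)]
        ring
      · intro j hj
        rw [Int.toNat_natCast]
        exact getD_set_ne _ _ _ _ (fun e => hj e.symm)
    · refine ⟨s.1, by rw [if_neg hklt], hlen, ?_, fun j _ => rfl⟩
      have hkN : k + 1 = A.length := by omega
      rw [hZk, hkN, List.drop_length]
      simp [zcnt]
  obtain ⟨Z1, hZ1eq, hZ1len, hZ1k, hZ1ne⟩ := hZ1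
  have hdrop : A.drop k = A.getD k 0 :: A.drop (k + 1) := drop_eq_getD_cons A k hk
  simp only [zStep, Int.toNat_natCast] at hZ1eq ⊢
  rw [hZ1eq]
  by_cases hA : A.getD k 0 = 0
  · rw [if_pos hA]
    refine ⟨by simp [hZ1len], ?_, ?_, ?_⟩
    · intro j hj1 hj2
      rcases Nat.eq_or_lt_of_le hj1 with he | hlt
      · subst he
        rw [getD_set_self _ _ _ (by omega), hZ1k, hdrop, zcnt_cons, if_pos hA]
      · rw [getD_set_ne _ _ _ _ (by omega), hZ1ne j (by omega)]
        exact hup j (by omega) hj2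
    · intro j hj
      rw [getD_set_ne _ _ _ _ (by omega), hZ1ne j (by omega)]
      exact hlow j (by omega)
    · rw [hlo, hdrop]
      simp only [lnzI, hA]
      cases hl : lnzI (A.drop (k + 1)) <;> simp [hl] <;> push_cast <;> ring
  · rw [if_neg hA]
    refine ⟨hZ1len, ?_, ?_, ?_⟩
    · intro j hj1 hj2
      rcases Nat.eq_or_lt_of_le hj1 with he | hlt
      · subst he
        rw [hZ1k, hdrop, zcnt_cons, if_neg hA]
        ring
      · rw [hZ1ne j (by omega)]
        exact hup j (by omega) hj2
    · intro j hj
      rw [hZ1ne j (by omega)]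
      exact hlow j (by omega)
    · rw [hlo, hdrop]
      simp only [lnzI]
      cases hl : lnzI (A.drop (k + 1)) with
      | some j => simp [hl] <;> push_cast <;> ring
      | none =>
        simp only [hl]
        simp only [List.getD_eq_getElem?_getD] at hA
        simp [hA]

theorem zLoop_inv (A : List Int) (k : Nat) (hk : k ≤ A.length) (s : List Int × Option Int)
    (h : InvZ A k s) :
    InvZ A 0 ((PySem.List.pyRange ((k : Int) - 1) (-1) (-1)).foldl (zStep A A.length) s) := by
  induction k generalizing s with
  | zero =>
    rw [PySem.List.pyRange_neg_one_eq_nil (by norm_num)]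
    simpa using h
  | succ k ih =>
    rw [show ((k + 1 : Nat) : Int) - 1 = (k : Int) by push_cast; ring,
      PySem.List.pyRange_neg_one_cons (by omega)]
    rw [List.foldl_cons]
    exact ih (by omega) _ (zStep_inv A k (by omega) s h)

theorem ocnt_concat (l : List Int) (x : Int) :
    ocnt (l ++ [x]) = ocnt l + (if x = 1 then 1 else 0) := by
  by_cases hx : x = 1 <;> simp [ocnt, List.count_append, hx]

theorem ansS_concat (l : List Int) (x c : Int) :
    ansS c (l ++ [x]) = ansS c l + (if x = 1 then 0 else c + ocnt l) := by
  rw [ansS_append]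
  by_cases hx : x = 1 <;> simp [ansS, hx]

theorem length_take_of_le (A : List Int) (k : Nat) (h : k ≤ A.length) :
    (A.take k).length = k := by simp [List.length_take]; omega

theorem oStep_inv (A : List Int) (k : Nat) (hk : k < A.length) (s : List Int × Option Int × Int)
    (h : InvO A k s) : InvO A (k + 1) (oStep A s (k : Int)) := by
  obtain ⟨hlen, hdone, htodo, hfz, hans⟩ := h
  have hOk : s.1.getD k 0 = 0 := htodo k (by omega)
  have htake : A.take (k + 1) = A.take k ++ [A.getD k 0] := take_succ_getD A k hk
  -- the O array after the `if i > 0` update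
  have hO1 : ∃ O1 : List Int,
      (if (0 : Int) < (k : Int) then
        s.1.set (Int.toNat (k : Int)) (s.1.getD (Int.toNat (k : Int)) 0 + s.1.getD (Int.toNat (k : Int) - 1) 0)
       else s.1) = O1 ∧
      O1.length = A.length ∧ O1.getD k 0 = ocnt (A.take k) ∧
      (∀ j, j ≠ k → O1.getD j 0 = s.1.getD j 0) := by
    by_cases hk0 : (0 : Int) < (k : Int)
    · refine ⟨_, by rw [if_pos hk0], ?_, ?_, ?_⟩
      · simp [hlen]
      · rw [Int.toNat_natCast]
        rw [getD_set_self _ _ _ (by omega), hOk, hdone (k - 1) (by omega)]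
        have : k - 1 + 1 = k := by omega
        rw [this]
        ring
      · intro j hj
        rw [Int.toNat_natCast]
        exact getD_set_ne _ _ _ _ (fun e => hj e.symm)
    · have hk00 : k = 0 := by omega
      refine ⟨s.1, by rw [if_neg hk0], hlen, ?_, fun j _ => rfl⟩
      rw [hOk, hk00]
      simp [ocnt]
  obtain ⟨O1, hO1eq, hO1len, hO1k, hO1ne⟩ := hO1
  simp only [oStep, Int.toNat_natCast] at hO1eq ⊢
  rw [hO1eq]
  by_cases hA : A.getD k 0 = 1
  · rw [if_pos hA]
    refine ⟨by simp [hO1len], ?_, ?_, ?_, ?_⟩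
    · intro j hj
      rcases Nat.lt_succ_iff_lt_or_eq.mp hj with hlt | he
      · rw [getD_set_ne _ _ _ _ (by omega), hO1ne j (by omega)]
        exact hdone j hlt
      · subst he
        rw [getD_set_self _ _ _ (by omega), hO1k, htake, ocnt_concat, if_pos hA]
    · intro j hj
      rw [getD_set_ne _ _ _ _ (by omega), hO1ne j (by omega)]
      exact htodo j (by omega)
    · rw [hfz, htake, fnzI_concat]
      have hA' : A[k]?.getD 0 = 1 := by simpa [List.getD_eq_getElem?_getD] using hA
      cases hf : fnzI (A.take k) <;> simp [hf, hA']
    · rw [hans, htake, ansS_concat, if_pos hA]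
      ring
  · rw [if_neg hA]
    refine ⟨hO1len, ?_, ?_, ?_, ?_⟩
    · intro j hj
      rcases Nat.lt_succ_iff_lt_or_eq.mp hj with hlt | he
      · rw [hO1ne j (by omega)]
        exact hdone j hlt
      · subst he
        rw [hO1k, htake, ocnt_concat, if_neg hA]
        ring
    · intro j hj
      rw [hO1ne j (by omega)]
      exact htodo j (by omega)
    · rw [hfz, htake, fnzI_concat]
      cases hf : fnzI (A.take k) with
      | some j => simp [hf]
      | none =>
        have hA' : ¬ A[k]?.getD 0 = 1 := by simpa [List.getD_eq_getElem?_getD] using hA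
        simp [hf, hA', length_take_of_le A k (by omega)]
    · rw [hans, htake, ansS_concat, if_neg hA, hO1k]
      simp

theorem oLoop_inv (A : List Int) (k : Nat) (hk : k ≤ A.length) (s : List Int × Option Int × Int)
    (h : InvO A k s) :
    InvO A A.length ((PySem.List.pyRange (k : Int) (A.length : Int) 1).foldl (oStep A) s) := by
  induction hn : A.length - k generalizing k s with
  | zero =>
    rw [PySem.List.pyRange_one_eq_nil (by omega)]
    have : k = A.length := by omega
    subst this
    simpa using h
  | succ n ih =>
    rw [PySem.List.pyRange_one_cons (by exact_mod_cast (by omega : k < A.length))]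
    rw [List.foldl_cons]
    have := oStep_inv A k (by omega) s h
    have hrec := ih (k + 1) (by omega) _ this (by omega)
    rw [show ((k : Int) + 1) = ((k + 1 : Nat) : Int) by push_cast; ring]
    exact hrec

theorem getD_take (A : List Int) (n m : Nat) (h : m < n) :
    (A.take n).getD m 0 = A.getD m 0 := by
  simp [List.getD_eq_getElem?_getD, List.getElem?_take, h]

theorem count_zero_of_all_one (l : List Int) (h : ∀ m, m < l.length → l.getD m 0 = 1) :
    l.count 0 = 0 := by
  induction l with
  | nil => simp
  | cons x xs ih =>
    have hx : x = 1 := by simpa using h 0 (by simp)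
    have hr := ih (fun m hm => by simpa using h (m + 1) (by simpa using hm))
    simp [List.count_cons, hx, hr]

theorem zcnt_split (A : List Int) (n : Nat) : zcnt A = zcnt (A.take n) + zcnt (A.drop n) := by
  rw [← zcnt_append, List.take_append_drop]

theorem ocnt_split (A : List Int) (n : Nat) : ocnt A = ocnt (A.take n) + ocnt (A.drop n) := by
  rw [← ocnt_append, List.take_append_drop]

-- ===== VERDICT (by name: the statement is the Claim_ definition above) =====
theorem max_inversions_spec : Claim_equal_max_inversions := by
  intro A _
  unfold Spec_max_inversions
  have hZ0 : InvZ A A.length (List.replicate A.length 0, none) := by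
    refine ⟨by simp, by intro j hj1 hj2; omega, fun j _ => getD_replicate _ _, by
      simp [List.drop_length, lnzI]⟩
  have hz := zLoop_inv A A.length le_rfl _ hZ0
  have hO0 : InvO A 0 (List.replicate A.length 0, none, 0) := by
    refine ⟨by simp, by intro j hj; omega, fun j _ => getD_replicate _ _, by simp [fnzI_nil],
      by simp [ansS]⟩
  have ho := oLoop_inv A 0 (Nat.zero_le _) _ hO0
  rw [Nat.cast_zero] at ho
  obtain ⟨hzlen, hzup, hzlow, hzlo⟩ := hz
  obtain ⟨holen, hodone, hotodo, hofz, hoans⟩ := ho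
  rw [List.take_length] at hofz hoans
  rw [List.drop_zero] at hzlo
  have hans0 : 0 ≤ ansS 0 A := ansS_nonneg A 0 le_rfl
  simp only [max_inversions, max_inversions_alt, bLoop_spec, zero_add]
  rw [hzlo, hofz, hoans]
  cases hf : fnzI A with
  | none =>
    cases hl : lnzI A with
    | none =>
      simp only [hf, hl]
      simp
      omega
    | some l =>
      obtain ⟨hlN, hlne, hpost⟩ := lnzI_some_spec A l hl
      have hdropz : ∀ m, m < (A.drop (l + 1)).length → (A.drop (l + 1)).getD m 0 = 0 := by
        intro m hm
        rw [getD_drop_add]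
        exact hpost (l + 1 + m) (by omega) (by simp at hm; omega)
      have hcz := count_of_all_zero _ hdropz
      have hzl : zcnt (A.drop l) = (A.length : Int) - 1 - l := by
        rw [drop_eq_getD_cons A l hlN, zcnt_cons, if_neg hlne]
        have : zcnt (A.drop (l + 1)) = ((A.length - (l + 1) : Nat) : Int) := by
          rw [zcnt, hcz.1, List.length_drop]
        rw [this]
        push_cast
        omega
      have hol : ocnt (A.take (l + 1)) = ocnt A := by
        rw [ocnt_split A (l + 1)]
        have : ocnt (A.drop (l + 1)) = 0 := by rw [ocnt, hcz.2]; rfl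
        rw [this]
        ring
      simp only [hf, hl]
      simp only [Option.bind_none, Option.bind_some, Option.map_none, Option.map_some,
        Nat.zero_add, Int.toNat_natCast, Option.bind_eq_bind, pure]
      rw [hodone l hlN, hzup l (by omega) hlN]
      rw [hzl, hol]
      omega
  | some f =>
    obtain ⟨hfN, hfne, hpre⟩ := fnzI_some_spec A f hf
    have htakeone : ∀ m, m < (A.take f).length → (A.take f).getD m 0 = 1 := by
      intro m hm
      rw [getD_take A f m (by simp at hm; omega)]
      exact hpre m (by simp at hm; omega)
    have hzf : zcnt (A.drop f) = zcnt A := by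
      rw [zcnt_split A f]
      have : zcnt (A.take f) = 0 := by rw [zcnt, count_zero_of_all_one _ htakeone]; rfl
      rw [this]
      ring
    have hof : ocnt (A.take (f + 1)) = ocnt (A.take f) := by
      rw [take_succ_getD A f hfN, ocnt_concat, if_neg hfne]
      ring
    have hOf : _ := hodone f hfN
    have hZf : _ := hzup f (by omega) hfN
    cases hl : lnzI A with
    | none =>
      simp only [hf, hl]
      simp only [Option.bind_none, Option.bind_some, Option.map_none, Option.map_some,
        Nat.zero_add, Int.toNat_natCast, Option.bind_eq_bind, pure]
      rw [hOf, hZf, hzf, hof]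
      omega
    | some l =>
      obtain ⟨hlN, hlne, hpost⟩ := lnzI_some_spec A l hl
      have hdropz : ∀ m, m < (A.drop (l + 1)).length → (A.drop (l + 1)).getD m 0 = 0 := by
        intro m hm
        rw [getD_drop_add]
        exact hpost (l + 1 + m) (by omega) (by simp at hm; omega)
      have hcz := count_of_all_zero _ hdropz
      have hzl : zcnt (A.drop l) = (A.length : Int) - 1 - l := by
        rw [drop_eq_getD_cons A l hlN, zcnt_cons, if_neg hlne]
        have : zcnt (A.drop (l + 1)) = ((A.length - (l + 1) : Nat) : Int) := by
          rw [zcnt, hcz.1, List.length_drop]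
        rw [this]
        push_cast
        omega
      have hol : ocnt (A.take (l + 1)) = ocnt A := by
        rw [ocnt_split A (l + 1)]
        have : ocnt (A.drop (l + 1)) = 0 := by rw [ocnt, hcz.2]; rfl
        rw [this]
        ring
      simp only [hf, hl]
      simp only [Option.bind_none, Option.bind_some, Option.map_none, Option.map_some,
        Nat.zero_add, Int.toNat_natCast, Option.bind_eq_bind, pure]
      rw [hOf, hZf, hzf, hof, hodone l hlN, hzup l (by omega) hlN]
      rw [hzl, hol]
      omega
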